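-- pv_equiv track=rewrite | github.com/martinhaagmans/zorganimatie | app.py | parse_oud_specifiek
-- ===== SOURCE A (Python) =====
-- def parse_oud_specifiek(parsed_filmscript, out):
--     out['t6'] = ''
--     for k, v in parsed_filmscript.items():
--         if 'Hoe weet ik zeker of ik dit medicijn mag gebruiken?' in v:
--             out['t2'] = k
--         elif 'Moet ik ergens specifiek op letten als ik dit medicijn gebruik?' in v:
--             out['t3'] = k
--         elif 'Mag ik wel zelf rijden als ik dit medicijn gebruik?' in v:
--             out['t7'] = k
--         elif 'Okay, en hoe moet ik dit medicijn precies gebruiken?' in v: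
--             out['t8'] = k
--         elif 'Wat moet ik doen als ik per ongeluk te veel heb gebruikt?' in v:
--             out['t9'] = k
--         elif 'Wat voor bijwerkingen kan ik verwachten?' in v:
--             out['t11'] = k
--     return out
-- ===== SOURCE B (Python) =====
-- _TABLE = [
--     ('Hoe weet ik zeker of ik dit medicijn mag gebruiken?', 't2'),
--     ('Moet ik ergens specifiek op letten als ik dit medicijn gebruik?', 't3'),
--     ('Mag ik wel zelf rijden als ik dit medicijn gebruik?', 't7'),
--     ('Okay, en hoe moet ik dit medicijn precies gebruiken?', 't8'),
--     ('Wat moet ik doen als ik per ongeluk te veel heb gebruikt?', 't9'),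
--     ('Wat voor bijwerkingen kan ik verwachten?', 't11'),
-- ]
--
-- def parse_oud_specifiek(parsed_filmscript, out):
--     # Question-major staged passes: label every script line first, then write out.
--     out['t6'] = ''
--     items = list(parsed_filmscript.items())
--     labels = [None] * len(items)
--     for sub, field in _TABLE:  # earlier questions take precedence over later ones
--         labels = [field if lab is None and sub in v else lab
--                   for lab, (_, v) in zip(labels, items)]
--     for (k, _), lab in zip(items, labels):
--         if lab is not None:
--             out[lab] = k
--     return out
-- ===== Notes on version B (the rewrite author's own statement) =====
-- stated objective: alternative
-- what changed: Inverts the loop nesting: instead of an elif ladder per script line, B makes one pass per question over a label array (earlier questions taking precedence), then a single insertion pass writes the labelled keys into out.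
import Mathlib
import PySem

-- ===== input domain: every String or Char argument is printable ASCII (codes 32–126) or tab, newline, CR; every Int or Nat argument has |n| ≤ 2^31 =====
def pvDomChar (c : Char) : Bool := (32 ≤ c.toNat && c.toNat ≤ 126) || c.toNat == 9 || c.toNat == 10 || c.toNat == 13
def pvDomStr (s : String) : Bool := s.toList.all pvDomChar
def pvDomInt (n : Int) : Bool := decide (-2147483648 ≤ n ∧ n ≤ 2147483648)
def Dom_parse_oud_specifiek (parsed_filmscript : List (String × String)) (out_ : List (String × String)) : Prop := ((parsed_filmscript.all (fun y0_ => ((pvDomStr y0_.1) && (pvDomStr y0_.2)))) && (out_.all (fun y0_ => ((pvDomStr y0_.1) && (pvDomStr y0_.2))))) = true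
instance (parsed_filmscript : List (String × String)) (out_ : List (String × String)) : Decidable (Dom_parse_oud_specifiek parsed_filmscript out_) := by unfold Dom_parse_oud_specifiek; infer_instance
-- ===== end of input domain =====

-- B inverts the loop nesting: one pass per question over a label array (earlier
-- questions take precedence), then one insertion pass (objective: alternative).

-- ===== PORT A =====
-- the elif ladder, literally, as the loop body folded over the dict's items
def pvStepA (d : PySem.Dict String String) (kv : String × String) : PySem.Dict String String :=
  if PySem.Str.isIn "Hoe weet ik zeker of ik dit medicijn mag gebruiken?" kv.2 then d.insert "t2" kv.1
  else if PySem.Str.isIn "Moet ik ergens specifiek op letten als ik dit medicijn gebruik?" kv.2 then d.insert "t3" kv.1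
  else if PySem.Str.isIn "Mag ik wel zelf rijden als ik dit medicijn gebruik?" kv.2 then d.insert "t7" kv.1
  else if PySem.Str.isIn "Okay, en hoe moet ik dit medicijn precies gebruiken?" kv.2 then d.insert "t8" kv.1
  else if PySem.Str.isIn "Wat moet ik doen als ik per ongeluk te veel heb gebruikt?" kv.2 then d.insert "t9" kv.1
  else if PySem.Str.isIn "Wat voor bijwerkingen kan ik verwachten?" kv.2 then d.insert "t11" kv.1
  else d

def parse_oud_specifiek (parsed_filmscript : List (String × String)) (out_ : List (String × String)) : List (String × String) :=
  (((PySem.Dict.ofList parsed_filmscript).items).foldl pvStepA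
    ((PySem.Dict.ofList out_).insert "t6" "")).items

-- ===== PORT B =====
-- module-level table of (substring, output field) pairs, in the original order
def pvTable : List (String × String) :=
  [("Hoe weet ik zeker of ik dit medicijn mag gebruiken?", "t2"),
   ("Moet ik ergens specifiek op letten als ik dit medicijn gebruik?", "t3"),
   ("Mag ik wel zelf rijden als ik dit medicijn gebruik?", "t7"),
   ("Okay, en hoe moet ik dit medicijn precies gebruiken?", "t8"),
   ("Wat moet ik doen als ik per ongeluk te veel heb gebruikt?", "t9"),
   ("Wat voor bijwerkingen kan ik verwachten?", "t11")]

-- one question-major pass: the comprehension over zip(labels, items)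
def pvPass (items : List (String × String)) (labels : List (Option String))
    (e : String × String) : List (Option String) :=
  List.zipWith (fun lab kv => if lab = none ∧ PySem.Str.isIn e.1 kv.2 then some e.2 else lab)
    labels items

-- final insertion pass: the loop over zip(items, labels)
def pvWrite (d : PySem.Dict String String) (p : (String × String) × Option String) :
    PySem.Dict String String :=
  match p.2 with
  | some f => d.insert f p.1.1
  | none => d

def parse_oud_specifiek_alt (parsed_filmscript : List (String × String)) (out_ : List (String × String)) : List (String × String) :=
  let d0 := (PySem.Dict.ofList out_).insert "t6" ""
  let items := (PySem.Dict.ofList parsed_filmscript).items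
  let labels := pvTable.foldl (pvPass items) (List.replicate items.length none)
  ((items.zip labels).foldl pvWrite d0).items

-- ===== PRECONDITION & SPEC =====
def Spec_parse_oud_specifiek (parsed_filmscript : List (String × String)) (out_ : List (String × String)) (out : List (String × String)) : Prop := out = parse_oud_specifiek_alt parsed_filmscript out_
instance (parsed_filmscript : List (String × String)) (out_ : List (String × String)) (out : List (String × String)) : Decidable (Spec_parse_oud_specifiek parsed_filmscript out_ out) := by unfold Spec_parse_oud_specifiek; infer_instance

-- ===== CLAIM (what is proved, stated in full; the proofs are below) =====
def Claim_equal_parse_oud_specifiek : Prop := ∀ (parsed_filmscript : List (String × String)) (out_ : List (String × String)), Dom_parse_oud_specifiek parsed_filmscript out_ → Spec_parse_oud_specifiek parsed_filmscript out_ (parse_oud_specifiek parsed_filmscript out_)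

-- ===== LEMMAS AND PROOFS =====
-- first table entry whose substring occurs in v (what a line's final label is)
def pvMatch (T : List (String × String)) (v : String) : Option String :=
  (T.find? (fun e => PySem.Str.isIn e.1 v)).map (·.2)

-- the elif ladder assigns exactly the first-matching table entry
theorem pvStepA_eq_match (d : PySem.Dict String String) (kv : String × String) :
    pvStepA d kv = pvWrite d (kv, pvMatch pvTable kv.2) := by
  unfold pvStepA pvWrite pvMatch pvTable
  simp only [List.find?]
  cases h1 : PySem.Str.isIn "Hoe weet ik zeker of ik dit medicijn mag gebruiken?" kv.2 <;>
  cases h2 : PySem.Str.isIn "Moet ik ergens specifiek op letten als ik dit medicijn gebruik?" kv.2 <;>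
  cases h3 : PySem.Str.isIn "Mag ik wel zelf rijden als ik dit medicijn gebruik?" kv.2 <;>
  cases h4 : PySem.Str.isIn "Okay, en hoe moet ik dit medicijn precies gebruiken?" kv.2 <;>
  cases h5 : PySem.Str.isIn "Wat moet ik doen als ik per ongeluk te veel heb gebruikt?" kv.2 <;>
  cases h6 : PySem.Str.isIn "Wat voor bijwerkingen kan ik verwachten?" kv.2 <;>
  simp_all

-- composing two aligned zipWiths over the same right-hand list
theorem pvZipWith_zipWith {α β γ δ : Type} (f : α → β → γ) (g : γ → β → δ)
    (L : List α) (M : List β) :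
    List.zipWith g (List.zipWith f L M) M = List.zipWith (fun a b => g (f a b) b) L M := by
  induction L generalizing M with
  | nil => simp
  | cons a L ih => cases M with
    | nil => simp
    | cons b M => simp [ih]

-- zipWith that ignores its right argument, on a long-enough right list
theorem pvZipWith_left {α β : Type} (L : List α) (M : List β) (h : L.length ≤ M.length) :
    List.zipWith (fun a _ => a) L M = L := by
  induction L generalizing M with
  | nil => simp
  | cons a L ih => cases M with
    | nil => simp at h
    | cons b M => simp_all

-- the question-major passes compute each line's first-matching label
theorem pvFoldl_pass_eq (T : List (String × String)) (items : List (String × String))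
    (L : List (Option String)) (h : L.length ≤ items.length) :
    T.foldl (pvPass items) L =
      List.zipWith (fun lab kv => if lab = none then pvMatch T kv.2 else lab) L items := by
  induction T generalizing L with
  | nil =>
    have hf : (fun (lab : Option String) (kv : String × String) =>
        if lab = none then pvMatch [] kv.2 else lab) = fun lab _ => lab := by
      funext lab kv; cases lab <;> simp [pvMatch]
    simp only [List.foldl_nil, hf, pvZipWith_left L items h]
  | cons e T ih =>
    have hlen : (pvPass items L e).length ≤ items.length := by
      simp only [pvPass, List.length_zipWith]; omega
    have hf : (fun (lab : Option String) (kv : String × String) =>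
        if (if lab = none ∧ PySem.Str.isIn e.1 kv.2 then some e.2 else lab) = none
        then pvMatch T kv.2
        else if lab = none ∧ PySem.Str.isIn e.1 kv.2 then some e.2 else lab) =
        fun lab kv => if lab = none then pvMatch (e :: T) kv.2 else lab := by
      funext lab kv
      cases lab with
      | some s => simp
      | none =>
        cases hm : PySem.Str.isIn e.1 kv.2 <;> simp at hm <;>
          simp [pvMatch, List.find?, hm]
    rw [List.foldl_cons, ih _ hlen]
    unfold pvPass
    rw [pvZipWith_zipWith, hf]

-- zipping a list with its own labels and folding = folding the classified step
theorem pvFoldl_zip_eq (items : List (String × String)) (d : PySem.Dict String String) :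
    (items.zip (items.map (fun kv => pvMatch pvTable kv.2))).foldl pvWrite d =
      items.foldl pvStepA d := by
  induction items generalizing d with
  | nil => rfl
  | cons kv rest ih =>
    simp only [List.map_cons, List.zip_cons_cons, List.foldl_cons, ih, pvStepA_eq_match]

-- the initial all-None label list, consumed by the first zipWith
theorem pvZipWith_replicate (items : List (String × String)) (T : List (String × String)) :
    List.zipWith (fun lab kv => if lab = none then pvMatch T kv.2 else lab)
      (List.replicate items.length (none : Option String)) items =
      items.map (fun kv => pvMatch T kv.2) := by
  induction items with
  | nil => rfl
  | cons kv rest ih => simp [List.replicate_succ, ih]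

-- ===== VERDICT (by name: the statement is the Claim_ definition above) =====
theorem parse_oud_specifiek_spec : Claim_equal_parse_oud_specifiek := by
  intro ps o _
  unfold Spec_parse_oud_specifiek parse_oud_specifiek parse_oud_specifiek_alt
  dsimp only
  rw [pvFoldl_pass_eq _ _ _ (by simp), pvZipWith_replicate, pvFoldl_zip_eq]
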